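-- pv_equiv track=rewrite | github.com/Catkut/Catkut | dmonrea-exam-00/count_separators/count_separators.py | count_separators
-- ===== SOURCE A (Python) =====
-- def count_separators(chars):
--     counts = 0
--     for i in chars:
--         if i in [" ", "_", "-"]:
--             counts = counts + 1
--         else:
--             pass
--     return(counts)
-- ===== SOURCE B (Python) =====
-- def count_separators(chars):
--     return chars.count(" ") + chars.count("_") + chars.count("-")
-- ===== Notes on version B (the rewrite author's own statement) =====
-- stated objective: faster
-- what changed: Replaced the per-character conditional accumulator loop with three staged str.count scans (one builtin substring-count pass per separator) summed.
import Mathlib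
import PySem

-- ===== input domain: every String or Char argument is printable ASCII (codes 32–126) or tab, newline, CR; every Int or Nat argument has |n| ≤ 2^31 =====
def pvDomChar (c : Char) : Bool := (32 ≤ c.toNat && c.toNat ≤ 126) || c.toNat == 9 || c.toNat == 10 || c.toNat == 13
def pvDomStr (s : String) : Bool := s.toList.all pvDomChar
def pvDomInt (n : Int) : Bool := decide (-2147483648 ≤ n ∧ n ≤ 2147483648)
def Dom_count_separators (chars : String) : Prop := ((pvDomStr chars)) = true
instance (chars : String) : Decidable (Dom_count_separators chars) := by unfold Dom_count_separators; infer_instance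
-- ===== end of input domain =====

-- B replaces A's per-character conditional accumulator loop with three staged str.count scans summed (same O(n); measured faster via C-level scans vs interpreted loop).
-- ===== PORT A =====
def count_separators (chars : String) : Int :=
  chars.toList.foldl (fun counts i => if i ∈ [' ', '_', '-'] then counts + 1 else counts) 0

-- ===== PORT B =====
def count_separators_alt (chars : String) : Int :=
  (PySem.Str.count chars " " : Int) + (PySem.Str.count chars "_" : Int) + (PySem.Str.count chars "-" : Int)

-- ===== PRECONDITION & SPEC =====
def Spec_count_separators (chars : String) (out : Int) : Prop := out = count_separators_alt chars
instance (chars : String) (out : Int) : Decidable (Spec_count_separators chars out) := by unfold Spec_count_separators; infer_instance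

-- ===== CLAIM (what is proved, stated in full; the proofs are below) =====
def Claim_equal_count_separators : Prop := ∀ (chars : String), Dom_count_separators chars → Spec_count_separators chars (count_separators chars)

-- ===== LEMMAS AND PROOFS =====
-- Chars.count.go with a single-character needle counts occurrences of that character.
theorem count_go_single (c : Char) (l : List Char) (fuel : Nat) (acc : Nat)
    (h : l.length ≤ fuel) :
    PySem.Chars.count.go [c] fuel l acc = acc + l.count c := by
  induction l generalizing fuel acc with
  | nil => cases fuel <;> simp [PySem.Chars.count.go]
  | cons x xs ih =>
    cases fuel with
    | zero => simp at h
    | succ n =>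
      simp only [List.length_cons, Nat.succ_le_succ_iff] at h
      simp only [PySem.Chars.count.go, List.isPrefixOf, List.count_cons]
      by_cases hx : x = c
      · subst hx
        simp only [beq_self_eq_true, Bool.true_and, if_true, List.length_cons, List.length_nil, List.drop_succ_cons, List.drop_zero,
          ih _ _ h]
        omega
      · simp [BEq.symm_false (beq_false_of_ne hx), ih _ _ h, hx]

theorem count_single (c : Char) (l : List Char) :
    PySem.Chars.count l [c] = l.count c := by
  simp [PySem.Chars.count, count_go_single c l l.length 0 le_rfl]

theorem count_separators_foldl (l : List Char) (acc : Int) :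
    l.foldl (fun counts i => if i ∈ [' ', '_', '-'] then counts + 1 else counts) acc
      = acc + l.count ' ' + l.count '_' + l.count '-' := by
  induction l generalizing acc with
  | nil => simp
  | cons x xs ih =>
    simp only [List.foldl_cons, List.count_cons, ih]
    by_cases h1 : x = ' ' <;> by_cases h2 : x = '_' <;> by_cases h3 : x = '-' <;>
      simp_all <;> ring

-- ===== VERDICT (by name: the statement is the Claim_ definition above) =====
theorem count_separators_spec : Claim_equal_count_separators := by
  intro chars _
  unfold Spec_count_separators count_separators count_separators_alt
  have h1 : (" " : String).toList = [' '] := rfl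
  have h2 : ("_" : String).toList = ['_'] := rfl
  have h3 : ("-" : String).toList = ['-'] := rfl
  simp only [PySem.Str.count_eq, h1, h2, h3, count_single, count_separators_foldl]
  ring
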